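-- pv_equiv track=rewrite | github.com/das-jishu/data-structures-basics-leetcode | Recursion/phrase-list-of-words.py | check
-- ===== SOURCE A (Python) =====
-- def check(phrase, li, output=None):
--     if output == None:
--         output = []
--
--     for word in li:
--         if phrase.startswith(word):
--             output.append(word)
--             return check(phrase[len(word):], li, output)
--
--     return output
-- ===== SOURCE B (Python) =====
-- def check(phrase, li, output=None):
--     # Trie-free variant of the reviewer's idea: index the distinct words by their
--     # first-occurrence position in li; at each step scan the prefixes of the phrase
--     # and take the indexed prefix word with the smallest li-position.
--     if output is None:
--         output = []
--     idx = {}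
--     for i, w in enumerate(li):
--         if w and w not in idx:
--             idx[w] = i
--     maxlen = 0
--     for w in li:
--         if len(w) > maxlen:
--             maxlen = len(w)
--     while phrase:
--         best = None
--         for k in range(1, min(maxlen, len(phrase)) + 1):
--             j = idx.get(phrase[:k])
--             if j is not None and (best is None or j < best[0]):
--                 best = (j, phrase[:k])
--         if best is None:
--             break
--         output.append(best[1])
--         phrase = phrase[len(best[1]):]
--     return output
-- ===== Notes on version B (the rewrite author's own statement) =====
-- stated objective: faster
-- what changed: Replaces A's recursion that rescans the whole word list at every step by an iterative loop over a dict mapping each distinct word to its first li-index: each step scans the prefixes of the remaining phrase (up to the max word length) and picks the indexed word with the smallest li-index, which equals A's first match.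
-- outside the precondition, e.g. on check('ab', ['a', ''], None): A raises RecursionError, B returns ['a']
-- crash fix: When li contains the empty string '' A recurses forever and raises RecursionError; B's index skips empty words and it returns the greedy segmentation (e.g. ['a'] on ('ab', ['a', ''])). — e.g. on check("ab", ["a", ""], none): A raises RecursionError, B returns ["a"]
import Mathlib
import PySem

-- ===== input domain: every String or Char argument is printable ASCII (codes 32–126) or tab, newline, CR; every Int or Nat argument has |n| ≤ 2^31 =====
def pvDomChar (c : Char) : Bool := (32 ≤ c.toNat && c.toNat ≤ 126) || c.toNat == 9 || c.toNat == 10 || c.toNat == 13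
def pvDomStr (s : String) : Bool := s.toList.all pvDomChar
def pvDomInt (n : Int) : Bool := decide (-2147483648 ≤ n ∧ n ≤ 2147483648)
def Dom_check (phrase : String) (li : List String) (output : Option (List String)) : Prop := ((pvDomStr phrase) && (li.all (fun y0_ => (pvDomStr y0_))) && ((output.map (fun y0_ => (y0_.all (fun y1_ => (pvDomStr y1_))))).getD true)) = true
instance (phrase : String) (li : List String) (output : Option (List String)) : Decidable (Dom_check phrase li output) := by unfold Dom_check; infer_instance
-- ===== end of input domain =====

-- B replaces A's recursion that rescans the whole word list each step by an iterative loop over a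
-- dict mapping each distinct word to its first li-index: each step scans the prefixes of the
-- remaining phrase and takes the indexed word with the smallest li-index (= A's first match in li).
-- Objective: faster (each step looks at ≤ maxlen prefixes instead of all of li). A mutates the
-- caller's `output` list in place; B performs the same mutation; the theorems are about the return value.

-- ===== PORT A =====
-- the `for word in li: if phrase.startswith(word): …` scan: first matching word, if any
def checkFind (p : List Char) : List String → Option String
  | [] => none
  | w :: ws => if PySem.Chars.startswith p w.toList then some w else checkFind p ws

-- A's recursion, with fuel = |phrase| + 1 (each step under Pre_ consumes ≥ 1 character;
-- where Python recurses forever (empty word matched) it raises RecursionError — outside Pre_)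
def checkGo : Nat → List Char → List String → List String → List String
  | 0, _, _, out => out
  | fuel + 1, p, li, out =>
    match checkFind p li with
    | none => out
    | some w => checkGo fuel (PySem.List.slice p (some (w.toList.length : Int)) none) li (out ++ [w])

def check (phrase : String) (li : List String) (output : Option (List String)) : List String :=
  checkGo (phrase.toList.length + 1) phrase.toList li (output.getD [])

-- ===== PORT B =====
-- `for i, w in enumerate(li): if w and w not in idx: idx[w] = i`
def buildIdx : Int → List String → PySem.Dict (List Char) Int → PySem.Dict (List Char) Int
  | _, [], d => d
  | i, w :: ws, d =>
    buildIdx (i + 1) ws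
      (if w.toList = [] then d
       else match d.get? w.toList with
            | some _ => d
            | none => d.insert w.toList i)

-- `maxlen = 0; for w in li: if len(w) > maxlen: maxlen = len(w)`
def maxLen (li : List String) : Nat :=
  li.foldl (fun m w => if w.toList.length > m then w.toList.length else m) 0

-- one step of the inner `for k in range(…)` loop: keep the indexed prefix with the smallest index
def bestStep (p : List Char) (d : PySem.Dict (List Char) Int)
    (best : Option (Int × List Char)) (k : Int) : Option (Int × List Char) :=
  match d.get? (PySem.List.slice p none (some k)) with
  | none => best
  | some j =>
    match best with
    | none => some (j, PySem.List.slice p none (some k))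
    | some (jb, wb) => if j < jb then some (j, PySem.List.slice p none (some k)) else some (jb, wb)

-- the `while phrase:` loop; fuel = |phrase| + 1 suffices: every indexed word is nonempty,
-- so each iteration strictly shortens the phrase (B's Python loop always terminates)
def altGo : Nat → List Char → PySem.Dict (List Char) Int → Nat → List String → List String
  | 0, _, _, _, out => out
  | fuel + 1, p, d, ml, out =>
    if p = [] then out
    else
      match (PySem.List.pyRange 1 ((min ml p.length : Nat) + 1) 1).foldl (bestStep p d) none with
      | none => out
      | some (_, w) =>
        altGo fuel (PySem.List.slice p (some (w.length : Int)) none) d ml (out ++ [String.ofList w])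

def check_alt (phrase : String) (li : List String) (output : Option (List String)) : List String :=
  altGo (phrase.toList.length + 1) phrase.toList (buildIdx 0 li PySem.Dict.empty) (maxLen li) (output.getD [])

-- ===== PRECONDITION & SPEC =====
-- Pre_ excludes lists containing the empty word: there Python A recurses forever (RecursionError)
def Pre_check (phrase : String) (li : List String) (output : Option (List String)) : Prop :=
  "" ∉ li
instance (phrase : String) (li : List String) (output : Option (List String)) : Decidable (Pre_check phrase li output) := by unfold Pre_check; infer_instance

def pvWitness_check : String × List String × Option (List String) := ("applepie", ["apple", "pie"], none)

-- A raises RecursionError whenever li contains the empty word ""; B's index skips empty words and returns the greedy segmentation.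
def Raises_check (phrase : String) (li : List String) (output : Option (List String)) : Prop :=
  "" ∈ li
instance (phrase : String) (li : List String) (output : Option (List String)) : Decidable (Raises_check phrase li output) := by unfold Raises_check; infer_instance
def pvRaiseWitness_check : String × List String × Option (List String) := ("ab", ["a", ""], none)
def pvRaiseWitnessOut_check : List String := ["a"]

def Spec_check (phrase : String) (li : List String) (output : Option (List String)) (out : List String) : Prop := out = check_alt phrase li output
instance (phrase : String) (li : List String) (output : Option (List String)) (out : List String) : Decidable (Spec_check phrase li output out) := by unfold Spec_check; infer_instance

-- ===== CLAIM (what is proved, stated in full; the proofs are below) =====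
def Claim_equal_check : Prop := ∀ (phrase : String) (li : List String) (output : Option (List String)), Dom_check phrase li output → Pre_check phrase li output → Spec_check phrase li output (check phrase li output)

def Claim_raises_check : Prop := (∀ (phrase : String) (li : List String) (output : Option (List String)), Dom_check phrase li output → Raises_check phrase li output → ¬ Pre_check phrase li output) ∧ (Dom_check (pvRaiseWitness_check.1) (pvRaiseWitness_check.2.1) (pvRaiseWitness_check.2.2) ∧ Raises_check (pvRaiseWitness_check.1) (pvRaiseWitness_check.2.1) (pvRaiseWitness_check.2.2) ∧ check_alt (pvRaiseWitness_check.1) (pvRaiseWitness_check.2.1) (pvRaiseWitness_check.2.2) = pvRaiseWitnessOut_check)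

-- ===== LEMMAS AND PROOFS =====

theorem toList_eq_nil {w : String} (hn : w.toList = []) : w = "" := by
  have := congrArg String.ofList hn; simpa using this

-- A's scan is List.find?
theorem checkFind_eq_find? (p : List Char) (li : List String) :
    checkFind p li = li.find? (fun w => PySem.Chars.startswith p w.toList) := by
  induction li with
  | nil => rfl
  | cons w ws ih =>
    simp only [checkFind, List.find?]
    cases h : PySem.Chars.startswith p w.toList <;> simp [ih]

theorem find_nil {li : List String} (h : "" ∉ li) : checkFind [] li = none := by
  rw [checkFind_eq_find?, List.find?_eq_none]
  intro w hw hs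
  have : w.toList <+: ([] : List Char) := (PySem.Chars.startswith_iff _ _).mp hs
  exact h ((toList_eq_nil (List.prefix_nil.mp this)) ▸ hw)

-- the index dict is the first-occurrence index of each nonempty word
theorem buildIdx_get? :
    ∀ (ws : List String) (i : Int) (d : PySem.Dict (List Char) Int) (w : String),
      (buildIdx i ws d).get? w.toList =
        match d.get? w.toList with
        | some j => some j
        | none => if w = "" then none
                  else (PySem.List.index? ws w).map (fun n => i + (n : Int)) := by
  intro ws
  induction ws with
  | nil =>
    intro i d w
    cases hd : d.get? w.toList <;> simp [buildIdx, hd, PySem.List.index?]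
  | cons v vs ih =>
    intro i d w
    simp only [buildIdx]
    by_cases hv : v.toList = []
    · have hv' : v = "" := toList_eq_nil hv
      rw [if_pos hv, ih]
      subst hv'
      cases hd : d.get? w.toList with
      | some j => simp [hd]
      | none =>
        by_cases hw : w = ""
        · simp [hd, hw]
        · have hne : ("" : String) ≠ w := fun e => hw e.symm
          rw [PySem.List.index?_cons_of_ne vs hne]
          cases hn : PySem.List.index? vs w <;> simp [hd, hw, hn] <;> omega
    · rw [if_neg hv]
      have hvw : v ≠ "" := fun e => hv (by simp [e])
      cases hdv : d.get? v.toList with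
      | some j' =>
        simp only [hdv]
        rw [ih]
        cases hd : d.get? w.toList with
        | some j => simp [hd]
        | none =>
          by_cases hw : w = v
          · rw [hw] at hd; rw [hd] at hdv; cases hdv
          · have hne : v ≠ w := fun e => hw e.symm
            rw [PySem.List.index?_cons_of_ne vs hne]
            by_cases hw0 : w = ""
            · simp [hd, hw0]
            · cases hn : PySem.List.index? vs w <;> simp [hd, hw0, hn] <;> omega
      | none =>
        simp only [hdv]
        rw [ih]
        by_cases hw : w = v
        · subst hw
          have h0 := PySem.List.index?_cons_self w vs
          simp only [PySem.List.index?_eq_idxOf?] at h0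
          simp [PySem.Dict.get?_insert_self, hdv, hvw, h0]
        · have hne : w.toList ≠ v.toList := fun e => hw (by
            have := congrArg String.ofList e; simpa using this)
          rw [PySem.Dict.get?_insert_of_ne _ _ hne]
          cases hd : d.get? w.toList with
          | some j => simp [hd]
          | none =>
            have hne2 : v ≠ w := fun e => hw e.symm
            rw [PySem.List.index?_cons_of_ne vs hne2]
            by_cases hw0 : w = ""
            · simp [hd, hw0]
            · cases hn : PySem.List.index? vs w <;> simp [hd, hw0, hn] <;> omega

-- maxLen bounds every word length
theorem le_maxLen_aux :
    ∀ (li : List String) (acc : Nat),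
      acc ≤ li.foldl (fun m w => if w.toList.length > m then w.toList.length else m) acc ∧
      ∀ w ∈ li, w.toList.length ≤ li.foldl (fun m w => if w.toList.length > m then w.toList.length else m) acc := by
  intro li
  induction li with
  | nil => intro acc; exact ⟨le_refl _, by simp⟩
  | cons v vs ih =>
    intro acc
    simp only [List.foldl_cons]
    obtain ⟨h1, h2⟩ := ih (if v.toList.length > acc then v.toList.length else acc)
    have hle : acc ≤ (if v.toList.length > acc then v.toList.length else acc) := by split <;> omega
    have hv : v.toList.length ≤ (if v.toList.length > acc then v.toList.length else acc) := by split <;> omega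
    refine ⟨le_trans hle h1, fun w hw => ?_⟩
    rcases List.mem_cons.mp hw with rfl | hw'
    · exact le_trans hv h1
    · exact h2 w hw'

theorem le_maxLen {li : List String} {w : String} (hw : w ∈ li) :
    w.toList.length ≤ maxLen li :=
  (le_maxLen_aux li 0).2 w hw

-- find? minimality in terms of first-occurrence indices
theorem find?_min (pred : String → Bool) :
    ∀ (li : List String) (ww : String), li.find? pred = some ww →
      ∃ n0, PySem.List.index? li ww = some n0 ∧
        ∀ (w : String) (n : Nat), pred w = true → PySem.List.index? li w = some n →
          n0 ≤ n ∧ (n = n0 → w = ww) := by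
  intro li
  induction li with
  | nil => intro ww h; simp at h
  | cons v vs ih =>
    intro ww h
    by_cases hp : pred v = true
    · have hww : ww = v := by
        rw [List.find?_cons, hp] at h; exact (Option.some_inj.mp h).symm
      subst hww
      refine ⟨0, PySem.List.index?_cons_self ww vs, fun w n hw hidx => ?_⟩
      refine ⟨Nat.zero_le _, fun hn0 => ?_⟩
      by_cases hwv : w = ww
      · exact hwv
      · have hc := PySem.List.index?_cons_of_ne vs (fun e : ww = w => hwv e.symm)
        rw [hc] at hidx
        cases hm : PySem.List.index? vs w with
        | none => rw [hm] at hidx; cases hidx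
        | some m => rw [hm] at hidx; simp at hidx; omega
    · have h' : vs.find? pred = some ww := by
        rw [List.find?_cons] at h
        cases hpv : pred v with
        | true => exact absurd hpv hp
        | false => rw [hpv] at h; exact h
      obtain ⟨n0, hn0, hmin⟩ := ih ww h'
      have hpw : pred ww = true := List.find?_some h'
      have hne : v ≠ ww := fun e => hp (e ▸ hpw)
      have hc := PySem.List.index?_cons_of_ne vs hne
      rw [hn0] at hc
      refine ⟨n0 + 1, by simpa using hc, fun w n hw hidx => ?_⟩
      have hnew : v ≠ w := fun e => hp (e ▸ hw)
      have hc2 := PySem.List.index?_cons_of_ne vs hnew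
      rw [hc2] at hidx
      cases hm : PySem.List.index? vs w with
      | none => rw [hm] at hidx; cases hidx
      | some m =>
        rw [hm] at hidx; simp at hidx
        obtain ⟨hle, heq⟩ := hmin w m hw hm
        exact ⟨by omega, fun hn => heq (by omega)⟩

-- the fold finds nothing when no prefix is indexed
theorem bestFold_none (p : List Char) (d : PySem.Dict (List Char) Int) :
    ∀ (ks : List Int), (∀ k ∈ ks, d.get? (PySem.List.slice p none (some k)) = none) →
      ks.foldl (bestStep p d) none = none := by
  intro ks
  induction ks with
  | nil => intro _; rfl
  | cons k ks ih =>
    intro hall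
    have hk := hall k List.mem_cons_self
    simp only [List.foldl_cons]
    rw [show bestStep p d none k = none by simp [bestStep, hk]]
    exact ih fun k' hk' => hall k' (List.mem_cons_of_mem _ hk')

-- the fold reaches and keeps the minimal-index entry
theorem bestFold_some (p : List Char) (d : PySem.Dict (List Char) Int) (j0 : Int) (w0 : List Char) :
    ∀ (ks : List Int) (acc : Option (Int × List Char)),
      (∀ k ∈ ks, ∀ j, d.get? (PySem.List.slice p none (some k)) = some j →
        j0 ≤ j ∧ (j = j0 → PySem.List.slice p none (some k) = w0)) →
      (acc = none ∨ ∃ j w, acc = some (j, w) ∧ j0 ≤ j ∧ (j = j0 → w = w0)) →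
      ((∃ k ∈ ks, d.get? (PySem.List.slice p none (some k)) = some j0) ∨ acc = some (j0, w0)) →
      ks.foldl (bestStep p d) acc = some (j0, w0) := by
  intro ks
  induction ks with
  | nil =>
    intro acc _ _ hR
    rcases hR with ⟨k, hk, _⟩ | hacc
    · cases hk
    · simpa using hacc
  | cons k ks ih =>
    intro acc hH hI hR
    have hHk := hH k List.mem_cons_self
    have hH' : ∀ k' ∈ ks, ∀ j, d.get? (PySem.List.slice p none (some k')) = some j →
        j0 ≤ j ∧ (j = j0 → PySem.List.slice p none (some k') = w0) :=
      fun k' hk' => hH k' (List.mem_cons_of_mem _ hk')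
    simp only [List.foldl_cons]
    cases hg : d.get? (PySem.List.slice p none (some k)) with
    | none =>
      rw [show bestStep p d acc k = acc by simp [bestStep, hg]]
      refine ih acc hH' hI ?_
      rcases hR with ⟨k', hk', hsome⟩ | hacc
      · rcases List.mem_cons.mp hk' with rfl | hk''
        · rw [hg] at hsome; cases hsome
        · exact Or.inl ⟨k', hk'', hsome⟩
      · exact Or.inr hacc
    | some j =>
      obtain ⟨hj, hjw⟩ := hHk j hg
      rcases hI with hacc | ⟨jb, wb, hacc, hjb, hjbw⟩
      · subst hacc
        rw [show bestStep p d none k = some (j, PySem.List.slice p none (some k)) by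
          simp [bestStep, hg]]
        refine ih _ hH' (Or.inr ⟨j, _, rfl, hj, fun e => hjw e⟩) ?_
        rcases hR with ⟨k', hk', hsome⟩ | habs
        · rcases List.mem_cons.mp hk' with rfl | hk''
          · rw [hg] at hsome
            have hj0 : j = j0 := Option.some_inj.mp hsome
            exact Or.inr (by rw [hj0, hjw hj0])
          · exact Or.inl ⟨k', hk'', hsome⟩
        · cases habs
      · subst hacc
        by_cases hlt : j < jb
        · rw [show bestStep p d (some (jb, wb)) k = some (j, PySem.List.slice p none (some k)) by
            simp [bestStep, hg, hlt]]
          refine ih _ hH' (Or.inr ⟨j, _, rfl, hj, fun e => hjw e⟩) ?_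
          rcases hR with ⟨k', hk', hsome⟩ | hacc0
          · rcases List.mem_cons.mp hk' with rfl | hk''
            · rw [hg] at hsome
              have hj0 : j = j0 := Option.some_inj.mp hsome
              exact Or.inr (by rw [hj0, hjw hj0])
            · exact Or.inl ⟨k', hk'', hsome⟩
          · have h1 : jb = j0 := congrArg (·.1) (Option.some_inj.mp hacc0)
            omega
        · rw [show bestStep p d (some (jb, wb)) k = some (jb, wb) by
            simp [bestStep, hg, hlt]]
          refine ih _ hH' (Or.inr ⟨jb, wb, rfl, hjb, hjbw⟩) ?_
          rcases hR with ⟨k', hk', hsome⟩ | hacc0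
          · rcases List.mem_cons.mp hk' with rfl | hk''
            · rw [hg] at hsome
              have hj0 : j = j0 := Option.some_inj.mp hsome
              have hjb0 : jb = j0 := by omega
              exact Or.inr (by rw [hjb0, hjbw hjb0])
            · exact Or.inl ⟨k', hk'', hsome⟩
          · exact Or.inr hacc0

-- lookup in the built index, in terms of first-occurrence positions
theorem dget (li : List String) (cs : List Char) :
    (buildIdx 0 li PySem.Dict.empty).get? cs =
      if cs = [] then none
      else (PySem.List.index? li (String.ofList cs)).map (fun n => 0 + (n : Int)) := by
  have hb := buildIdx_get? li 0 PySem.Dict.empty (String.ofList cs)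
  rw [String.toList_ofList] at hb
  rw [hb]
  have hemp : (PySem.Dict.empty : PySem.Dict (List Char) Int).get? cs = none := by simp
  rw [hemp]
  have hiff : (String.ofList cs = "") ↔ cs = [] := by
    constructor
    · intro e; have := congrArg String.toList e; simpa using this
    · rintro rfl; rfl
  by_cases hc : cs = []
  · simp [hc, hiff.mpr hc]
  · rw [if_neg (fun e => hc (hiff.mp e)), if_neg hc]

-- take of a positive length is nonempty
theorem take_ne_nil {p : List Char} {t : Nat} (h1 : 1 ≤ t) (h2 : t ≤ p.length) :
    p.take t ≠ [] := by
  intro e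
  rcases List.take_eq_nil_iff.mp e with h0 | h0
  · omega
  · rw [h0] at h2; simp at h2; omega

theorem startswith_take (p : List Char) (t : Nat) :
    PySem.Chars.startswith p (String.ofList (p.take t)).toList = true := by
  rw [String.toList_ofList, PySem.Chars.startswith_iff]
  exact List.take_prefix _ _

-- one step of B's while loop computes A's first match
theorem step_eq {li : List String} (h : "" ∉ li) (p : List Char) :
    match checkFind p li with
    | none => (PySem.List.pyRange 1 ((min (maxLen li) p.length : Nat) + 1) 1).foldl
        (bestStep p (buildIdx 0 li PySem.Dict.empty)) none = none
    | some ww => ∃ j0, (PySem.List.pyRange 1 ((min (maxLen li) p.length : Nat) + 1) 1).foldl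
        (bestStep p (buildIdx 0 li PySem.Dict.empty)) none = some (j0, ww.toList) := by
  cases hfind : checkFind p li with
  | none =>
    apply bestFold_none
    intro k hk
    obtain ⟨hk1, hk2⟩ := PySem.List.mem_pyRange_one.mp hk
    have hkp : k.toNat ≤ p.length := by omega
    rw [PySem.List.slice_to p (by omega), dget,
      if_neg (take_ne_nil (by omega) hkp)]
    cases hm : PySem.List.index? li (String.ofList (p.take k.toNat)) with
    | none => rfl
    | some n =>
      exfalso
      have hmem : String.ofList (p.take k.toNat) ∈ li :=
        (PySem.List.index?_isSome_iff li _).mp (by rw [hm]; rfl)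
      have hnone : li.find? (fun w => PySem.Chars.startswith p w.toList) = none := by
        rw [← checkFind_eq_find?, hfind]
      exact List.find?_eq_none.mp hnone _ hmem (startswith_take p k.toNat)
  | some ww =>
    have hfind' : li.find? (fun w => PySem.Chars.startswith p w.toList) = some ww := by
      rw [← checkFind_eq_find?, hfind]
    obtain ⟨n0, hn0, hmin⟩ := find?_min _ li ww hfind'
    have hmem : ww ∈ li := List.mem_of_find?_eq_some hfind'
    have hwne : ww ≠ "" := fun e => h (e ▸ hmem)
    have hsw : PySem.Chars.startswith p ww.toList = true := by
      simpa using List.find?_some hfind'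
    have hpre : ww.toList <+: p := (PySem.Chars.startswith_iff _ _).mp hsw
    have hlen1 : 1 ≤ ww.toList.length := by
      cases hw : ww.toList with
      | nil => exact absurd (toList_eq_nil hw) hwne
      | cons a t => simp
    refine ⟨0 + (n0 : Int), ?_⟩
    apply bestFold_some p (buildIdx 0 li PySem.Dict.empty) (0 + (n0 : Int)) ww.toList _ none
    · -- every indexed prefix has index ≥ n0, with equality only at ww itself
      intro k hk j hg
      obtain ⟨hk1, hk2⟩ := PySem.List.mem_pyRange_one.mp hk
      have hkp : k.toNat ≤ p.length := by omega
      rw [PySem.List.slice_to p (by omega)] at hg ⊢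
      rw [dget, if_neg (take_ne_nil (by omega) hkp)] at hg
      cases hm : PySem.List.index? li (String.ofList (p.take k.toNat)) with
      | none => rw [hm] at hg; cases hg
      | some n =>
        rw [hm] at hg
        simp at hg
        obtain ⟨hle, heq⟩ := hmin _ n (startswith_take p k.toNat) hm
        constructor
        · omega
        · intro hjj
          have hnn : n = n0 := by omega
          have := congrArg String.toList (heq hnn)
          rwa [String.toList_ofList] at this
    · exact Or.inl rfl
    · -- the index entry of ww itself is reached at k = |ww|
      left
      refine ⟨(ww.toList.length : Int), ?_, ?_⟩
      · rw [PySem.List.mem_pyRange_one]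
        have h1 : ww.toList.length ≤ maxLen li := le_maxLen hmem
        have h2 : ww.toList.length ≤ p.length := hpre.length_le
        omega
      · rw [PySem.List.slice_to p (by exact_mod_cast Nat.zero_le _)]
        have htn : ((ww.toList.length : Int)).toNat = ww.toList.length := by omega
        rw [htn, ← List.prefix_iff_eq_take.mp hpre]
        rw [dget, if_neg (fun e => hwne (toList_eq_nil e))]
        rw [show String.ofList ww.toList = ww from by
          have := congrArg String.ofList (rfl : ww.toList = ww.toList); simpa using this]
        rw [hn0]
        rfl

theorem go_eq {li : List String} (h : "" ∉ li) :
    ∀ (fuel : Nat) (p : List Char) (out : List String),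
      checkGo fuel p li out = altGo fuel p (buildIdx 0 li PySem.Dict.empty) (maxLen li) out := by
  intro fuel
  induction fuel with
  | zero => intro p out; rfl
  | succ f ih =>
    intro p out
    cases p with
    | nil => simp [checkGo, altGo, find_nil h]
    | cons c r =>
      have hs := step_eq h (li := li) (c :: r)
      cases hfind : checkFind (c :: r) li with
      | none =>
        rw [hfind] at hs
        simp only at hs
        simp only [checkGo, hfind, altGo, if_neg (by simp : ¬ (c :: r = [])), hs]
      | some ww =>
        rw [hfind] at hs
        simp only at hs
        obtain ⟨j0, hfold⟩ := hs
        simp only [checkGo, hfind, altGo, if_neg (by simp : ¬ (c :: r = [])), hfold]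
        rw [show String.ofList ww.toList = ww from by simp]
        exact ih _ _

-- ===== VERDICT (by name: the statement is the Claim_ definition above) =====
theorem check_spec : Claim_equal_check := by
  intro phrase li output _ hpre
  unfold Spec_check check check_alt
  exact go_eq hpre _ _ _

def check_raises : Claim_raises_check := by
  unfold Claim_raises_check
  exact ⟨fun _ li _ _ hr hp => hp hr, by decide⟩
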